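-- pv_equiv track=rewrite | github.com/kateliev/TypeRig | Lib/typerig/core/algo/stroke_sep.py | _find_best_collinear_pair
-- ===== SOURCE A (Python) =====
-- def _find_best_collinear_pair(angles):
-- 	"""Find the pair of angles closest to being collinear (180 deg apart).
--
-- 	Unlike _find_collinear_pair which uses a strict threshold,
-- 	this always returns the best pair regardless of deviation.
--
-- 	Returns: (idx_a, idx_b) or None if fewer than 2 angles.
-- 	"""
-- 	if len(angles) < 2:
-- 		return None
-- 	best_pair = None
-- 	best_dev = float('inf')
-- 	for i in range(len(angles)):
-- 		for j in range(i + 1, len(angles)):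
-- 			diff = abs(angles[i] - angles[j])
-- 			diff = min(diff, 360 - diff)
-- 			dev = abs(diff - 180)
-- 			if dev < best_dev:
-- 				best_dev = dev
-- 				best_pair = (i, j)
-- 	return best_pair
-- ===== SOURCE B (Python) =====
-- def _find_best_collinear_pair(angles):
-- 	"""Return the index pair whose angular difference is closest to 180 deg,
-- 	or None if fewer than 2 angles.
--
-- 	Since abs(min(d, 360 - d) - 180) == abs(d - 180) for any d >= 0, the
-- 	deviation of a pair reduces to abs(abs(a - b) - 180).  Compute the
-- 	minimum deviation once, then return the first pair attaining it.
-- 	"""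
-- 	n = len(angles)
-- 	if n < 2:
-- 		return None
-- 	best = min(abs(abs(angles[i] - angles[j]) - 180)
-- 	           for i in range(n) for j in range(i + 1, n))
-- 	for i in range(n):
-- 		for j in range(i + 1, n):
-- 			if abs(abs(angles[i] - angles[j]) - 180) == best:
-- 				return (i, j)
-- ===== Notes on version B (the rewrite author's own statement) =====
-- stated objective: simpler
-- what changed: A's single nested loop that accumulates (best_pair, best_dev) with a strict-< update is replaced by a two-phase reduce-then-search: the minimum deviation is a plain min() over the pair generator using the identity abs(min(d,360-d)-180) == abs(d-180) for d >= 0, and the answer is the first pair attaining that minimum, returned by an early-exit scan.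
import Mathlib
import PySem

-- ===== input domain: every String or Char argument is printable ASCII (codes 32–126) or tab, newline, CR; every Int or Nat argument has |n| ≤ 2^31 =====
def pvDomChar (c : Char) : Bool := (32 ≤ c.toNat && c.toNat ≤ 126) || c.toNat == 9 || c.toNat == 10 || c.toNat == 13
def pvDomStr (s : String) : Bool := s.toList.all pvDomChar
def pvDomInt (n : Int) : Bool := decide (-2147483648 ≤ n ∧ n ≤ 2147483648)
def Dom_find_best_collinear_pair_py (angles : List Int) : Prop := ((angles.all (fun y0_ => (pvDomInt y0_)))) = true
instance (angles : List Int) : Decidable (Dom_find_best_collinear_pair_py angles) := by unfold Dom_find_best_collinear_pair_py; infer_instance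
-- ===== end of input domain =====

-- B replaces A's single accumulate-best nested loop by a two-phase reduce-then-search:
-- a plain minimum of the pair deviations (using |min(d,360-d)-180| = |d-180| for d ≥ 0),
-- then an early-exit scan returning the first pair attaining it (objective: simpler).

-- ===== PORT A =====
def find_best_collinear_pair_py (angles : List Int) : Option (Int × Int) :=
  if angles.length < 2 then none
  else
    let st := (PySem.List.pyRange 0 (angles.length : Int) 1).foldl (fun st i =>
      (PySem.List.pyRange (i + 1) (angles.length : Int) 1).foldl (fun st j =>
        let diff0 := |PySem.List.pyGetD angles i 0 - PySem.List.pyGetD angles j 0|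
        let diff := min diff0 (360 - diff0)
        let dev := |diff - 180|
        -- best_dev starts as float('inf'): modelled as none; every int dev is < inf
        match st.2 with
        | none => (some (i, j), some dev)
        | some b => if dev < b then (some (i, j), some dev) else st) st)
      ((none, none) : Option (Int × Int) × Option Int)
    st.1

-- ===== PORT B =====
-- angles[i] (indices produced by range(), always in range)
def pvA (angles : List Int) (i : Int) : Int := PySem.List.pyGetD angles i 0

def find_best_collinear_pair_py_alt (angles : List Int) : Option (Int × Int) :=
  let n : Int := (angles.length : Int)
  if angles.length < 2 then none
  else
    -- best = min(<generator of pair deviations>); the generator is nonempty since n ≥ 2,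
    -- so the [] branch (where Python's min would raise) is unreachable
    let devs := (PySem.List.pyRange 0 n 1).flatMap (fun i =>
      (PySem.List.pyRange (i + 1) n 1).map (fun j =>
        |(|pvA angles i - pvA angles j|) - 180|))
    let best := match devs with | [] => 0 | d :: t => t.foldl min d
    -- nested for-loops with an early 'return (i, j)' = first match over the pair stream
    ((PySem.List.pyRange 0 n 1).flatMap (fun i =>
      (PySem.List.pyRange (i + 1) n 1).map (fun j => (i, j)))).find?
      (fun p => |(|pvA angles p.1 - pvA angles p.2|) - 180| == best)

-- ===== PRECONDITION & SPEC =====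
def Spec_find_best_collinear_pair_py (angles : List Int) (out : Option (Int × Int)) : Prop := out = find_best_collinear_pair_py_alt angles
instance (angles : List Int) (out : Option (Int × Int)) : Decidable (Spec_find_best_collinear_pair_py angles out) := by unfold Spec_find_best_collinear_pair_py; infer_instance

-- ===== CLAIM (what is proved, stated in full; the proofs are below) =====
def Claim_equal_find_best_collinear_pair_py : Prop := ∀ (angles : List Int), Dom_find_best_collinear_pair_py angles → Spec_find_best_collinear_pair_py angles (find_best_collinear_pair_py angles)

-- ===== LEMMAS AND PROOFS =====

-- the common deviation kernel |‖aᵢ - aⱼ‖ - 180| of a pair of indices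
def pvF (angles : List Int) (p : Int × Int) : Int :=
  |(|pvA angles p.1 - pvA angles p.2|) - 180|

-- the pair list both ports traverse, in lexicographic order
def pvP (angles : List Int) : List (Int × Int) :=
  (PySem.List.pyRange 0 (angles.length : Int) 1).flatMap (fun i =>
    (PySem.List.pyRange (i + 1) (angles.length : Int) 1).map (fun j => (i, j)))

-- A's loop body, on the deviation kernel f
def pvStep (f : Int × Int → Int) (st : Option (Int × Int) × Option Int) (p : Int × Int) :
    Option (Int × Int) × Option Int :=
  match st.2 with
  | none => (some p, some (f p))
  | some b => if f p < b then (some p, some (f p)) else st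

-- min of a list, none on []
def pvMinv : List Int → Option Int
  | [] => none
  | x :: t => some (t.foldl min x)

lemma pvMinv_append (l : List Int) (y : Int) :
    pvMinv (l ++ [y]) = some (min ((pvMinv l).getD y) y) := by
  cases l with
  | nil => simp [pvMinv]
  | cons x t => simp [pvMinv, List.foldl_append]

lemma pvMinv_le {l : List Int} {m : Int} (h : pvMinv l = some m) : ∀ y ∈ l, m ≤ y := by
  cases l with
  | nil => simp [pvMinv] at h
  | cons x t =>
    simp only [pvMinv, Option.some.injEq] at h
    subst h
    intro y hy
    rcases List.mem_cons.mp hy with rfl | hy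
    · exact (PySem.List.foldl_min_le t y).1
    · exact (PySem.List.foldl_min_le t x).2 y hy

lemma pvMinv_mem {l : List Int} {m : Int} (h : pvMinv l = some m) : m ∈ l := by
  cases l with
  | nil => simp [pvMinv] at h
  | cons x t =>
    simp only [pvMinv, Option.some.injEq] at h
    subst h
    rcases PySem.List.foldl_min_mem t x with h' | h'
    · rw [h']; exact List.mem_cons_self
    · exact List.mem_cons_of_mem _ h'

-- A's fold keeps the FIRST pair attaining the minimum deviation
lemma pvStep_foldl_char (f : Int × Int → Int) (L : List (Int × Int)) :
    L.foldl (pvStep f) (none, none) =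
      ((pvMinv (L.map f)).bind (fun m => L.find? (fun q => f q == m)), pvMinv (L.map f)) := by
  induction L using List.reverseRecOn with
  | nil => simp [pvMinv]
  | append_singleton L p ih =>
    rw [List.foldl_append, List.foldl_cons, List.foldl_nil, ih]
    simp only [List.map_append, List.map_cons, List.map_nil, pvMinv_append]
    cases hL : pvMinv (L.map f) with
    | none =>
      have : L = [] := by
        cases L with
        | nil => rfl
        | cons a t => simp [pvMinv] at hL
      subst this
      simp [pvStep]
    | some m =>
      simp only [Option.bind_some, Option.getD_some]
      by_cases hlt : f p < m
      · have hmin : min m (f p) = f p := by omega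
        rw [hmin]
        have hnone : L.find? (fun q => f q == f p) = none := by
          rw [List.find?_eq_none]
          intro q hq
          have := pvMinv_le hL (f q) (List.mem_map_of_mem hq)
          simp only [beq_iff_eq]
          omega
        rw [List.find?_append, hnone]
        simp [pvStep, hlt]
      · have hmin : min m (f p) = m := by omega
        rw [hmin]
        have hsome : (L.find? (fun q => f q == m)).isSome := by
          rw [List.find?_isSome]
          obtain ⟨q, hq, hfq⟩ := List.mem_map.mp (pvMinv_mem hL)
          exact ⟨q, hq, by simp [hfq]⟩
        rw [List.find?_append]
        cases hfind : L.find? (fun q => f q == m) with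
        | none => rw [hfind] at hsome; simp at hsome
        | some r => simp [pvStep, hlt]

-- |min(d, 360-d) - 180| = |d - 180|
lemma pv_dev_identity (d : Int) : |min d (360 - d) - 180| = |d - 180| := by
  rcases le_total d (360 - d) with h | h
  · rw [min_eq_left h]
  · rw [min_eq_right h]
    simp only [Int.abs_eq_natAbs]
    omega

-- port A versus the abstract strict-min fold over the pair list
lemma pv_portA_eq (angles : List Int) (h : ¬ angles.length < 2) :
    find_best_collinear_pair_py angles =
      ((pvP angles).foldl (pvStep (pvF angles)) (none, none)).1 := by
  unfold find_best_collinear_pair_py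
  rw [if_neg h]
  show (List.foldl _ ((none, none) : Option (Int × Int) × Option Int) _).1 = _
  congr 1
  rw [pvP, List.foldl_flatMap]
  apply PySem.List.foldl_congr_mem
  intro st i _
  rw [List.foldl_map]
  apply PySem.List.foldl_congr_mem
  intro st' j _
  show (let diff0 := |PySem.List.pyGetD angles i 0 - PySem.List.pyGetD angles j 0|
        let diff := min diff0 (360 - diff0)
        let dev := |diff - 180|
        match st'.2 with
        | none => (some (i, j), some dev)
        | some b => if dev < b then (some (i, j), some dev) else st') = pvStep (pvF angles) st' (i, j)
  simp only [pv_dev_identity]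
  rfl

-- port B versus the abstract min-then-find over the pair list
lemma pv_portB_eq (angles : List Int) (h : ¬ angles.length < 2) :
    find_best_collinear_pair_py_alt angles =
      (pvP angles).find? (fun p => pvF angles p ==
        (pvMinv ((pvP angles).map (pvF angles))).getD 0) := by
  unfold find_best_collinear_pair_py_alt
  rw [if_neg h]
  have hdev : (PySem.List.pyRange 0 (angles.length : Int) 1).flatMap (fun i =>
      (PySem.List.pyRange (i + 1) (angles.length : Int) 1).map (fun j =>
        |(|pvA angles i - pvA angles j|) - 180|)) = (pvP angles).map (pvF angles) := by
    rw [pvP, List.map_flatMap]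
    congr 1
    funext i
    rw [List.map_map]
    rfl
  show ((pvP angles).find? _) = _
  rw [hdev]
  cases (pvP angles).map (pvF angles) <;> rfl

-- ===== VERDICT (by name: the statement is the Claim_ definition above) =====
theorem find_best_collinear_pair_py_spec : Claim_equal_find_best_collinear_pair_py := by
  unfold Claim_equal_find_best_collinear_pair_py
  intro angles _
  unfold Spec_find_best_collinear_pair_py
  by_cases h : angles.length < 2
  · unfold find_best_collinear_pair_py find_best_collinear_pair_py_alt
    rw [if_pos h, if_pos h]
  · rw [pv_portA_eq angles h, pv_portB_eq angles h, pvStep_foldl_char]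
    have hP : ((0 : Int), (1 : Int)) ∈ pvP angles := by
      rw [pvP]
      apply List.mem_flatMap.mpr
      refine ⟨0, PySem.List.mem_pyRange_one.mpr ⟨le_refl _, by exact_mod_cast (by omega : 0 < angles.length)⟩, ?_⟩
      apply List.mem_map.mpr
      exact ⟨1, PySem.List.mem_pyRange_one.mpr ⟨by omega, by exact_mod_cast (by omega : 1 < angles.length)⟩, rfl⟩
    have hbbsome : ∃ bb, pvMinv ((pvP angles).map (pvF angles)) = some bb := by
      cases hl : (pvP angles).map (pvF angles) with
      | nil =>
        exfalso
        have := List.mem_map_of_mem (f := pvF angles) hP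
        rw [hl] at this
        exact absurd this (List.not_mem_nil)
      | cons d t => exact ⟨t.foldl min d, rfl⟩
    obtain ⟨bb, hbb⟩ := hbbsome
    rw [hbb, Option.getD_some, Option.bind_some]
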